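-- pv_equiv track=rewrite | github.com/Checkmk/checkmk | agents/plugins/mk_logwatch.py | _filter_maxcontextlines
-- ===== SOURCE A (Python) =====
-- def _filter_maxcontextlines(lines_list, before, after):
--     """Only produce lines from a limited context
--
--     Think of grep's -A and -B options
--     """
--
--     n_lines = len(lines_list)
--     indices = iter(range(-before, n_lines))
--     context_end = -1
--     for idx in indices:
--         new_in_context_idx = idx + before
--         if new_in_context_idx < n_lines and context_end < n_lines:
--             new_in_context = lines_list[new_in_context_idx]
--             # if the line ahead is relevant, extend the context
--             if new_in_context.startswith(("C", "W")):
--                 context_end = new_in_context_idx + after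
--         if 0 <= idx <= context_end:
--             yield lines_list[idx]
-- ===== SOURCE B (Python) =====
-- def _filter_maxcontextlines(lines_list, before, after):
--     """Only produce lines from a limited context (grep -A/-B style).
--
--     Strategy: one pass building prefix counts of matching lines, then for
--     each line test in O(1) whether some match lies in its window.
--     """
--     n = len(lines_list)
--     cnt = [0]
--     for line in lines_list:
--         cnt.append(cnt[-1] + (1 if line.startswith(("C", "W")) else 0))
--     for i, line in enumerate(lines_list):
--         lo = max(0, i - after)
--         hi = min(n, i + before + 1)
--         if lo < hi and cnt[hi] - cnt[lo] > 0:
--             yield line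
-- ===== Notes on version B (the rewrite author's own statement) =====
-- stated objective: alternative
-- what changed: Replaces A's single-pass incremental context_end frontier with a find-matches-then-emit decomposition: one pass builds a prefix-count table of lines starting with 'C'/'W', then each line is kept iff the count of matches inside its clamped window [i-after, i+before] is positive (an O(1) test per line).
import Mathlib
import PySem

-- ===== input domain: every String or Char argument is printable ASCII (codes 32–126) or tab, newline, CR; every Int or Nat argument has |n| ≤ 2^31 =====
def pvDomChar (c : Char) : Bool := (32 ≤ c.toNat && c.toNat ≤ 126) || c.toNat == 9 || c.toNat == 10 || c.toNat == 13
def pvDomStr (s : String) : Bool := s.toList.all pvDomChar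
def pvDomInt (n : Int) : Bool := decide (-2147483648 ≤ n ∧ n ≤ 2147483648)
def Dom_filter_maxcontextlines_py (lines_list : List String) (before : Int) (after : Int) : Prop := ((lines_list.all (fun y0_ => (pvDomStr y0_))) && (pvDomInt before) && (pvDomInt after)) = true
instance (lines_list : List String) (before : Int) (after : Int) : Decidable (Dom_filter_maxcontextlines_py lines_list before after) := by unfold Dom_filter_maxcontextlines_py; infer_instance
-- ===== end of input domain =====

-- B replaces A's incremental context_end frontier by a prefix-count table of matching
-- lines plus an O(1) window test per line (alternative decomposition, similar cost).


-- line.startswith(("C", "W"))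
def pvStarts (s : String) : Bool := PySem.Str.startswith s "C" || PySem.Str.startswith s "W"

-- ===== PORT A =====
-- loop body of A: look one line ahead, possibly extend the context frontier, then yield
def pvStepA (xs : List String) (before after : Int) (st : Int × List String) (idx : Int) :
    Int × List String :=
  let n : Int := xs.length
  let ni := idx + before
  let ce :=
    if ni < n ∧ st.1 < n then
      -- lines_list[ni]: here ni = idx + before ≥ 0 and ni < n, so the access is in range
      if pvStarts (PySem.List.pyGetD xs ni "") then ni + after else st.1
    else st.1
  let acc := if 0 ≤ idx ∧ idx ≤ ce then st.2 ++ [PySem.List.pyGetD xs idx ""] else st.2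
  (ce, acc)

def filter_maxcontextlines_py (lines_list : List String) (before : Int) (after : Int) : List String :=
  let n : Int := lines_list.length
  ((PySem.List.pyRange (-before) n 1).foldl (pvStepA lines_list before after) (-1, [])).2

-- ===== PORT B =====
def filter_maxcontextlines_py_alt (lines_list : List String) (before : Int) (after : Int) : List String :=
  let n : Int := lines_list.length
  -- cnt[k] = number of matching lines among the first k
  let cnt : List Int :=
    lines_list.foldl
      (fun c line => c ++ [PySem.List.pyGetD c (-1) 0 + (if pvStarts line then 1 else 0)])
      [0]
  (PySem.List.enumerate lines_list 0).filterMap (fun il =>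
    let lo := max 0 (il.1 - after)
    let hi := min n (il.1 + before + 1)
    if lo < hi ∧ 0 < PySem.List.pyGetD cnt hi 0 - PySem.List.pyGetD cnt lo 0 then
      some il.2
    else none)

-- ===== PRECONDITION & SPEC =====
def Spec_filter_maxcontextlines_py (lines_list : List String) (before : Int) (after : Int) (out : List String) : Prop := out = filter_maxcontextlines_py_alt lines_list before after
instance (lines_list : List String) (before : Int) (after : Int) (out : List String) : Decidable (Spec_filter_maxcontextlines_py lines_list before after out) := by unfold Spec_filter_maxcontextlines_py; infer_instance

-- ===== CLAIM (what is proved, stated in full; the proofs are below) =====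
def Claim_equal_filter_maxcontextlines_py : Prop := ∀ (lines_list : List String) (before : Int) (after : Int), Dom_filter_maxcontextlines_py lines_list before after → Spec_filter_maxcontextlines_py lines_list before after (filter_maxcontextlines_py lines_list before after)

-- ===== LEMMAS AND PROOFS =====

-- `some match j has i inside its window [j - before, j + after]`, as a Bool over the input
def pvKept (xs : List String) (before after i : Int) : Bool :=
  (PySem.List.enumerate xs 0).any
    (fun jl => pvStarts jl.2 && decide (jl.1 ≤ i + before) && decide (i ≤ jl.1 + after))

lemma pvKept_iff (xs : List String) (before after i : Int) :
    pvKept xs before after i = true ↔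
      ∃ j : Nat, ∃ h : j < xs.length,
        pvStarts xs[j] = true ∧ (j : Int) ≤ i + before ∧ i ≤ (j : Int) + after := by
  unfold pvKept
  rw [List.any_eq_true]
  constructor
  · rintro ⟨jl, hmem, hp⟩
    rcases (PySem.List.mem_enumerate_iff xs 0 jl).1 hmem with ⟨k, hk, rfl⟩
    simp only [zero_add, Bool.and_eq_true, decide_eq_true_eq] at hp
    exact ⟨k, hk, hp.1.1, hp.1.2, hp.2⟩
  · rintro ⟨j, hj, h1, h2, h3⟩
    refine ⟨((j : Int), xs[j]), ?_, ?_⟩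
    · exact (PySem.List.mem_enumerate_iff xs 0 _).2 ⟨j, hj, by simp⟩
    · simp [h1, h2, h3]

-- the prefix-count list B builds is the table of match counts over prefixes
lemma cnt_eq (xs : List String) :
    xs.foldl
      (fun c line => c ++ [PySem.List.pyGetD c (-1) 0 + (if pvStarts line then 1 else 0)])
      [0]
    = (List.range (xs.length + 1)).map (fun k => (((xs.take k).countP pvStarts : Nat) : Int)) := by
  induction xs using List.reverseRecOn with
  | nil => simp
  | append_singleton ys y ih =>
    rw [List.foldl_append, ih]
    simp only [List.foldl_cons, List.foldl_nil]
    have hlast : PySem.List.pyGetD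
        ((List.range (ys.length + 1)).map (fun k => (((ys.take k).countP pvStarts : Nat) : Int))) (-1) 0
        = ((ys.countP pvStarts : Nat) : Int) := by
      unfold PySem.List.pyGetD
      rw [PySem.List.pyGet?_neg_one]
      rw [List.range_succ, List.map_append]
      simp
    rw [hlast]
    rw [List.length_append, List.length_singleton]
    rw [List.range_succ (n := ys.length + 1), List.map_append]
    congr 1
    · apply List.map_congr_left
      intro k hk
      rw [List.mem_range] at hk
      rw [List.take_append_of_le_length (by omega)]
    · simp only [List.map_cons, List.map_nil]
      have h2 : (ys ++ [y]).take (ys.length + 1) = ys ++ [y] :=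
        List.take_of_length_le (by simp)
      rw [h2, List.countP_append]
      push_cast
      split_ifs with h <;> simp [List.countP_nil, h]

-- reading the prefix-count table at an in-range position
lemma cnt_get (xs : List String) (t : Int) (h0 : 0 ≤ t) (h1 : t ≤ (xs.length : Int)) :
    PySem.List.pyGetD ((List.range (xs.length + 1)).map
      (fun k => (((xs.take k).countP pvStarts : Nat) : Int))) t 0
    = (((xs.take t.toNat).countP pvStarts : Nat) : Int) := by
  rw [PySem.List.pyGetD_eq_getElem _ 0 h0 (by simp; omega)]
  simp

-- a positive count difference over a prefix pair is a match inside the segment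
lemma seg_pos (xs : List String) (a b : Nat) (hab : a ≤ b) :
    (0 : Int) < (((xs.take b).countP pvStarts : Nat) : Int)
        - (((xs.take a).countP pvStarts : Nat) : Int)
    ↔ ∃ j : Nat, ∃ _ : j < xs.length, a ≤ j ∧ j < b ∧ pvStarts xs[j] = true := by
  have hsplit : xs.take b = xs.take a ++ (xs.take b).drop a := by
    conv_lhs => rw [← List.take_append_drop a (xs.take b)]
    rw [List.take_take, Nat.min_eq_left hab]
  rw [hsplit, List.countP_append]
  push_cast
  have : ((xs.take a).countP pvStarts : Int) + (((xs.take b).drop a).countP pvStarts : Int)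
      - ((xs.take a).countP pvStarts : Int) = (((xs.take b).drop a).countP pvStarts : Int) := by ring
  rw [this]
  rw [Int.natCast_pos, List.countP_pos_iff]
  constructor
  · rintro ⟨x, hx, hpx⟩
    rcases List.mem_iff_getElem.1 hx with ⟨m, hm, rfl⟩
    have hlen : ((xs.take b).drop a).length = min b xs.length - a := by simp
    have hj : a + m < xs.length := by
      rw [hlen] at hm; omega
    refine ⟨a + m, hj, by omega, by rw [hlen] at hm; omega, ?_⟩
    · rw [List.getElem_drop, List.getElem_take] at hpx
      exact hpx
  · rintro ⟨j, hj, haj, hjb, hp⟩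
    refine ⟨xs[j], ?_, hp⟩
    rw [List.mem_iff_getElem]
    refine ⟨j - a, by simp; omega, ?_⟩
    rw [List.getElem_drop, List.getElem_take]
    congr 1
    omega

-- B's O(1) window test answers exactly pvKept, for indices of actual lines
lemma condB_iff (xs : List String) (before after : Int) (k : Nat) (_hk : k < xs.length) :
    (max 0 ((k : Int) - after) < min (xs.length : Int) ((k : Int) + before + 1) ∧
      0 < PySem.List.pyGetD ((List.range (xs.length + 1)).map
            (fun k => (((xs.take k).countP pvStarts : Nat) : Int)))
            (min (xs.length : Int) ((k : Int) + before + 1)) 0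
          - PySem.List.pyGetD ((List.range (xs.length + 1)).map
            (fun k => (((xs.take k).countP pvStarts : Nat) : Int)))
            (max 0 ((k : Int) - after)) 0)
    ↔ pvKept xs before after (k : Int) = true := by
  set lo : Int := max 0 ((k : Int) - after) with hlo
  set hi : Int := min (xs.length : Int) ((k : Int) + before + 1) with hhi
  rw [pvKept_iff]
  by_cases hlh : lo < hi
  · have h0lo : 0 ≤ lo := le_max_left _ _
    have hhin : hi ≤ (xs.length : Int) := min_le_left _ _
    rw [cnt_get xs hi (by omega) hhin, cnt_get xs lo h0lo (by omega)]
    rw [seg_pos xs lo.toNat hi.toNat (by omega)]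
    constructor
    · rintro ⟨-, j, hj, h1, h2, hp⟩
      exact ⟨j, hj, hp, by omega, by omega⟩
    · rintro ⟨j, hj, hp, h1, h2⟩
      exact ⟨hlh, j, hj, by omega, by omega, hp⟩
  · constructor
    · rintro ⟨h, -⟩; exact absurd h hlh
    · rintro ⟨j, hj, hp, h1, h2⟩
      exact absurd (by omega : lo < hi) hlh

-- A's loop invariant, upper part: every already-seen match's window forces the frontier
def pvIa (xs : List String) (before after lo ce : Int) : Prop :=
  ∀ j : Nat, ∀ _ : j < xs.length, pvStarts xs[j] = true → (j : Int) ≤ lo - 1 + before →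
    ∀ i : Int, lo ≤ i → i < (xs.length : Int) → i ≤ (j : Int) + after → i ≤ ce

-- A's loop invariant, lower part: indices admitted by the frontier really are in a window
def pvIb (xs : List String) (before after lo ce : Int) : Prop :=
  ∀ i : Int, lo ≤ i → 0 ≤ i → i ≤ ce →
    ∃ j : Nat, ∃ _ : j < xs.length,
      pvStarts xs[j] = true ∧ (j : Int) ≤ lo - 1 + before ∧ i ≤ (j : Int) + after

-- one loop step preserves the invariant, and its yield test agrees with pvKept
lemma step_pres (xs : List String) (before after lo ce : Int)
    (hlo : -before ≤ lo) (hlon : lo < (xs.length : Int))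
    (hIa : pvIa xs before after lo ce) (hIb : pvIb xs before after lo ce) :
    pvIa xs before after (lo + 1)
        (if lo + before < (xs.length : Int) ∧ ce < (xs.length : Int) then
          if pvStarts (PySem.List.pyGetD xs (lo + before) "") then lo + before + after else ce
        else ce) ∧
    pvIb xs before after (lo + 1)
        (if lo + before < (xs.length : Int) ∧ ce < (xs.length : Int) then
          if pvStarts (PySem.List.pyGetD xs (lo + before) "") then lo + before + after else ce
        else ce) ∧
    ((0 ≤ lo ∧ lo ≤ (if lo + before < (xs.length : Int) ∧ ce < (xs.length : Int) then
          if pvStarts (PySem.List.pyGetD xs (lo + before) "") then lo + before + after else ce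
        else ce)) ↔ (0 ≤ lo ∧ pvKept xs before after lo = true)) := by
  by_cases hg : lo + before < (xs.length : Int) ∧ ce < (xs.length : Int)
  · -- fresh index lo+before is a real line
    have h0ni : 0 ≤ lo + before := by omega
    have hgetd : PySem.List.pyGetD xs (lo + before) "" = xs[(lo + before).toNat]'(by omega) :=
      PySem.List.pyGetD_eq_getElem _ _ h0ni hg.1
    by_cases hp : pvStarts (PySem.List.pyGetD xs (lo + before) "") = true
    · simp only [hg, hp, and_self, if_pos]
      have hj0len : (lo + before).toNat < xs.length := by omega
      have hpj0 : pvStarts (xs[(lo + before).toNat]'hj0len) = true := by rw [← hgetd]; exact hp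
      refine ⟨?_, ?_, ?_⟩
      · intro j hj hpj hjle i hi hin hia
        have : (j : Int) ≤ lo + before := by omega
        omega
      · intro i hi h0i hice
        exact ⟨(lo + before).toNat, hj0len, hpj0, by omega, by omega⟩
      · constructor
        · rintro ⟨h0lo, hce⟩
          exact ⟨h0lo, (pvKept_iff _ _ _ _).2 ⟨(lo + before).toNat, hj0len, hpj0, by omega, by omega⟩⟩
        · rintro ⟨h0lo, hkept⟩
          rcases (pvKept_iff _ _ _ _).1 hkept with ⟨j, hj, hpj, hj1, hj2⟩
          exact ⟨h0lo, by omega⟩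
    · simp only [hg, hp, and_self, if_pos]
      have hfreshfalse : ∀ (j : Nat) (hj : j < xs.length), (j : Int) = lo + before →
          pvStarts (xs[j]'hj) = false := by
        intro j hj hje
        have : xs[j]'hj = xs[(lo + before).toNat]'(by omega) := by congr 1; omega
        rw [this, ← hgetd]
        exact Bool.not_eq_true _ ▸ hp
      refine ⟨?_, ?_, ?_⟩
      · intro j hj hpj hjle i hi hin hia
        rcases eq_or_lt_of_le hjle with he | hl
        · rw [hfreshfalse j hj (by omega)] at hpj; exact absurd hpj (by simp)
        · exact hIa j hj hpj (by omega) i (by omega) hin hia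
      · intro i hi h0i hice
        rcases hIb i (by omega) h0i hice with ⟨j, hj, hpj, hjle, hja⟩
        exact ⟨j, hj, hpj, by omega, hja⟩
      · constructor
        · rintro ⟨h0lo, hce⟩
          rcases hIb lo le_rfl h0lo hce with ⟨j, hj, hpj, hjle, hja⟩
          exact ⟨h0lo, (pvKept_iff _ _ _ _).2 ⟨j, hj, hpj, by omega, hja⟩⟩
        · rintro ⟨h0lo, hkept⟩
          rcases (pvKept_iff _ _ _ _).1 hkept with ⟨j, hj, hpj, hj1, hj2⟩
          rcases eq_or_lt_of_le hj1 with he | hl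
          · rw [hfreshfalse j hj (by omega)] at hpj; exact absurd hpj (by simp)
          · exact ⟨h0lo, hIa j hj hpj (by omega) lo le_rfl hlon hj2⟩
  · simp only [hg, if_false]
    refine ⟨?_, ?_, ?_⟩
    · intro j hj hpj hjle i hi hin hia
      rcases eq_or_lt_of_le hjle with he | hl
      · -- j = lo + before < length, so ¬hg forces length ≤ ce
        have : (xs.length : Int) ≤ ce := by omega
        omega
      · exact hIa j hj hpj (by omega) i (by omega) hin hia
    · intro i hi h0i hice
      rcases hIb i (by omega) h0i hice with ⟨j, hj, hpj, hjle, hja⟩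
      exact ⟨j, hj, hpj, by omega, hja⟩
    · constructor
      · rintro ⟨h0lo, hce⟩
        rcases hIb lo le_rfl h0lo hce with ⟨j, hj, hpj, hjle, hja⟩
        exact ⟨h0lo, (pvKept_iff _ _ _ _).2 ⟨j, hj, hpj, by omega, hja⟩⟩
      · rintro ⟨h0lo, hkept⟩
        rcases (pvKept_iff _ _ _ _).1 hkept with ⟨j, hj, hpj, hj1, hj2⟩
        rcases eq_or_lt_of_le hj1 with he | hl
        · have : (xs.length : Int) ≤ ce := by omega
          omega
        · exact ⟨h0lo, hIa j hj hpj (by omega) lo le_rfl hlon hj2⟩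

-- the step function, written out on an explicit state pair
lemma pvStepA_eq (xs : List String) (before after ce lo : Int) (acc : List String) :
    pvStepA xs before after (ce, acc) lo =
      ((if lo + before < (xs.length : Int) ∧ ce < (xs.length : Int) then
          if pvStarts (PySem.List.pyGetD xs (lo + before) "") then lo + before + after else ce
        else ce),
       (if 0 ≤ lo ∧ lo ≤ (if lo + before < (xs.length : Int) ∧ ce < (xs.length : Int) then
          if pvStarts (PySem.List.pyGetD xs (lo + before) "") then lo + before + after else ce
        else ce) then acc ++ [PySem.List.pyGetD xs lo ""] else acc)) := rfl

-- A's fold, from any frontier state satisfying the invariant, emits exactly the kept lines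
lemma loopA (xs : List String) (before after : Int) :
    ∀ (k : Nat) (lo ce : Int) (acc : List String),
      ((xs.length : Int) - lo).toNat = k → -before ≤ lo →
      pvIa xs before after lo ce → pvIb xs before after lo ce →
      ((PySem.List.pyRange lo (xs.length : Int) 1).foldl (pvStepA xs before after) (ce, acc)).2
      = acc ++ (PySem.List.pyRange lo (xs.length : Int) 1).filterMap
          (fun i => if 0 ≤ i ∧ pvKept xs before after i = true then
                      some (PySem.List.pyGetD xs i "") else none) := by
  intro k
  induction k with
  | zero =>
    intro lo ce acc hk hlo hIa hIb
    rw [PySem.List.pyRange_one_eq_nil (by omega)]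
    simp
  | succ k ih =>
    intro lo ce acc hk hlo hIa hIb
    have hlon : lo < (xs.length : Int) := by omega
    obtain ⟨hIa', hIb', hyield⟩ := step_pres xs before after lo ce hlo hlon hIa hIb
    rw [PySem.List.pyRange_one_cons hlon, List.foldl_cons, List.filterMap_cons,
      pvStepA_eq]
    by_cases hy : 0 ≤ lo ∧ lo ≤ (if lo + before < (xs.length : Int) ∧ ce < (xs.length : Int) then
          if pvStarts (PySem.List.pyGetD xs (lo + before) "") then lo + before + after else ce
        else ce)
    · have hkept : 0 ≤ lo ∧ pvKept xs before after lo = true := hyield.1 hy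
      rw [if_pos hy, if_pos hkept]
      rw [ih (lo + 1) _ (acc ++ [PySem.List.pyGetD xs lo ""]) (by omega) (by omega) hIa' hIb']
      simp
    · have hnk : ¬ (0 ≤ lo ∧ pvKept xs before after lo = true) := fun h => hy (hyield.2 h)
      rw [if_neg hy, if_neg hnk]
      rw [ih (lo + 1) _ acc (by omega) (by omega) hIa' hIb']

-- shifting the left end of the emission range past indices that are never kept
lemma dropLow (xs : List String) (F : Int → Option String) (a a' : Int) (ha : a ≤ a')
    (hnone : ∀ i : Int, a ≤ i → i < a' → F i = none) :
    (PySem.List.pyRange a (xs.length : Int) 1).filterMap F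
      = (PySem.List.pyRange a' (xs.length : Int) 1).filterMap F := by
  by_cases h : a' ≤ (xs.length : Int)
  · rw [PySem.List.pyRange_one_append a a' _ ha h, List.filterMap_append]
    have : (PySem.List.pyRange a a' 1).filterMap F = [] := by
      rw [List.filterMap_eq_nil_iff]
      intro i hi
      rw [PySem.List.mem_pyRange_one] at hi
      exact hnone i hi.1 hi.2
    rw [this, List.nil_append]
  · rw [PySem.List.pyRange_one_eq_nil (by omega : (xs.length : Int) ≤ a')]
    rw [List.filterMap_nil, List.filterMap_eq_nil_iff]
    intro i hi
    rw [PySem.List.mem_pyRange_one] at hi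
    exact hnone i hi.1 (by omega)

-- A computes the per-line pvKept filter
lemma portA_char (xs : List String) (before after : Int) :
    filter_maxcontextlines_py xs before after
      = (PySem.List.enumerate xs 0).filterMap
          (fun il => if 0 ≤ il.1 ∧ pvKept xs before after il.1 = true then some il.2 else none) := by
  unfold filter_maxcontextlines_py
  rw [loopA xs before after ((xs.length : Int) - (-before)).toNat (-before) (-1) [] rfl le_rfl
    (by intro j hj hpj hjle i hi hin hia; omega)
    (by intro i hi h0i hice; omega)]
  rw [List.nil_append]
  have hmid : (PySem.List.pyRange (-before) (xs.length : Int) 1).filterMap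
        (fun i => if 0 ≤ i ∧ pvKept xs before after i = true then
            some (PySem.List.pyGetD xs i "") else none)
      = (PySem.List.pyRange 0 (xs.length : Int) 1).filterMap
        (fun i => if 0 ≤ i ∧ pvKept xs before after i = true then
            some (PySem.List.pyGetD xs i "") else none) := by
    by_cases hb : -before ≤ 0
    · exact dropLow xs _ (-before) 0 hb (by
        intro i hi1 hi2
        rw [if_neg]
        rintro ⟨h0i, -⟩
        omega)
    · exact (dropLow xs _ 0 (-before) (by omega) (by
        intro i hi1 hi2
        rw [if_neg]
        rintro ⟨-, hkept⟩
        rcases (pvKept_iff _ _ _ _).1 hkept with ⟨j, hj, hpj, hj1, hj2⟩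
        omega)).symm
  rw [hmid]
  rw [PySem.List.enumerate_eq_map_pyRange xs "", List.filterMap_map]
  apply List.filterMap_congr
  intro i hi
  rfl

-- ===== VERDICT (by name: the statement is the Claim_ definition above) =====
theorem filter_maxcontextlines_py_spec : Claim_equal_filter_maxcontextlines_py := by
  intro xs before after _
  unfold Spec_filter_maxcontextlines_py
  rw [portA_char]
  unfold filter_maxcontextlines_py_alt
  rw [cnt_eq]
  apply Eq.symm
  apply List.filterMap_congr
  intro il hmem
  rcases (PySem.List.mem_enumerate_iff xs 0 il).1 hmem with ⟨k, hk, rfl⟩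
  simp only [zero_add]
  rw [if_congr (condB_iff xs before after k hk) rfl rfl]
  have : (0 : Int) ≤ (k : Int) := Int.natCast_nonneg k
  simp [this]
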